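-- pv_equiv track=rewrite | github.com/psrom/Algorithm | Programmers/String/140108_문자열 나누기/01_230821.py | solution
-- ===== SOURCE A (Python) =====
-- def solution(s):
--     count_x, count_not_x = 0, 0
--     answer = 0
--
--     for i in s:
--         if count_x == count_not_x:
--             answer += 1
--             temp = i
--         if temp == i:
--             count_x += 1
--         else:
--             count_not_x += 1
--
--     return answer
-- ===== SOURCE B (Python) =====
-- def solution(s):
--     # Segment-by-segment: a segment's cut point is the smallest even prefix
--     # length L of the remainder in which exactly half the characters equal the
--     # remainder's first character; if no such L exists the segment is the rest.
--     answer = 0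
--     rest = s
--     while rest:
--         answer += 1
--         ref = rest[0]
--         cut = len(rest)
--         for L in range(2, len(rest) + 1, 2):
--             if 2 * sum(c == ref for c in rest[:L]) == L:
--                 cut = L
--                 break
--         rest = rest[cut:]
--     return answer
-- ===== Notes on version B (the rewrite author's own statement) =====
-- stated objective: alternative
-- what changed: Instead of A's single pass with running match/mismatch counters, B finds each segment's cut point by searching the smallest even prefix length of the remainder whose character-equality sum balances (re-scanning the prefix each time), then slices the remainder past it.
import Mathlib
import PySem

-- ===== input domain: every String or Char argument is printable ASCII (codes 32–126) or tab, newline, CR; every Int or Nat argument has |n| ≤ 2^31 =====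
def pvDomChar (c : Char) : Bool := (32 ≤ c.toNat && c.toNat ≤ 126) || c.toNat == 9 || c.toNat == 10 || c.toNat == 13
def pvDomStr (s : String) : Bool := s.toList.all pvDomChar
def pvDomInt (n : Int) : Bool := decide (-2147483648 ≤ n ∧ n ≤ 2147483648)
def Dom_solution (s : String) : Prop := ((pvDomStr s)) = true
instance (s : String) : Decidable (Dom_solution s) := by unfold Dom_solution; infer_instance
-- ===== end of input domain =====

-- B replaces A's single pass with running match/mismatch counters by a per-segment
-- search for the smallest even balanced prefix length (re-scanning the prefix each
-- time) and slicing past it; alternative decomposition, not faster.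

-- ===== PORT A =====
-- one iteration of A's for-loop body; state is (count_x, count_not_x, answer, temp).
-- Python's `temp` is unassigned before the loop; the first iteration always assigns it
-- (0 == 0), so the placeholder 'A' is never read.
def stepA : Int × Int × Int × Char → Char → Int × Int × Int × Char
  | (cx, cnx, ans, t), i =>
    let ans' := if cx == cnx then ans + 1 else ans
    let t' := if cx == cnx then i else t
    if t' == i then (cx + 1, cnx, ans', t') else (cx, cnx + 1, ans', t')

def solution (s : String) : Int :=
  (s.toList.foldl stepA (0, 0, 0, 'A')).2.2.1

-- ===== PORT B =====
-- inner for-loop of Source B: `for L in range(2, len(rest)+1, 2)` searching the first even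
-- prefix length L with 2*sum(c == ref for c in rest[:L]) == L; Python's sum of the
-- booleans is exactly the count of characters equal to ref (List.countP here), and
-- rest[:L] with 0 ≤ L is List.take; returns len(rest) (the initial `cut`) if no break.
def searchCut (full : List Char) (ref : Char) (L : Nat) : Nat :=
  if L ≤ full.length then
    if 2 * (full.take L).countP (fun c => c == ref) = L then L
    else searchCut full ref (L + 2)
  else full.length
termination_by full.length + 2 - L

-- cited by altB's termination proof
theorem searchCut_ge_min (full : List Char) (ref : Char) :
    ∀ L : Nat, min L full.length ≤ searchCut full ref L := by
  intro L
  induction L using searchCut.induct full ref with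
  | case1 L hle hbal => rw [searchCut, if_pos hle, if_pos hbal]; omega
  | case2 L hle hbal ih => rw [searchCut, if_pos hle, if_neg hbal]; omega
  | case3 L hgt => rw [searchCut, if_neg hgt]; omega

-- outer while-loop of Source B over the remainder `rest`
def altB : List Char → Int
  | [] => 0
  | c :: rs => 1 + altB ((c :: rs).drop (searchCut (c :: rs) c 2))
termination_by l => l.length
decreasing_by
  have h := searchCut_ge_min (c :: rs) c 2
  simp only [List.length_drop, List.length_cons] at h ⊢
  omega

def solution_alt (s : String) : Int := altB s.toList

-- ===== PRECONDITION & SPEC =====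
def Spec_solution (s : String) (out : Int) : Prop := out = solution_alt s
instance (s : String) (out : Int) : Decidable (Spec_solution s out) := by unfold Spec_solution; infer_instance

-- ===== CLAIM (what is proved, stated in full; the proofs are below) =====
def Claim_equal_solution : Prop := ∀ (s : String), Dom_solution s → Spec_solution s (solution s)

-- ===== LEMMAS AND PROOFS =====

-- Proof-side model of the segment scan: consume characters counting same/diff against
-- ref, stop when they balance, and return the unconsumed suffix.
def altInner (ref : Char) : List Char → Int → Int → List Char
  | [], _, _ => []
  | y :: ys, same, diff =>
    let same' := if y == ref then same + 1 else same
    let diff' := if y == ref then diff else diff + 1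
    if same' == diff' then ys else altInner ref ys same' diff'

theorem altInner_cons_same (ref : Char) (ys : List Char) (same diff : Int) :
    altInner ref (ref :: ys) same diff =
      if same + 1 == diff then ys else altInner ref ys (same + 1) diff := by
  simp [altInner]

theorem altInner_cons_diff {y ref : Char} (h : y ≠ ref) (ys : List Char) (same diff : Int) :
    altInner ref (y :: ys) same diff =
      if same == diff + 1 then ys else altInner ref ys same (diff + 1) := by
  simp [altInner, h]

theorem altInner_length_le (ref : Char) :
    ∀ (xs : List Char) (same diff : Int), (altInner ref xs same diff).length ≤ xs.length := by
  intro xs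
  induction xs with
  | nil => intro same diff; simp [altInner]
  | cons y ys ih =>
    intro same diff
    by_cases hy : y = ref
    · subst hy
      rw [altInner_cons_same]
      split
      · exact Nat.le_succ _
      · exact Nat.le_trans (ih _ _) (Nat.le_succ _)
    · rw [altInner_cons_diff hy]
      split
      · exact Nat.le_succ _
      · exact Nat.le_trans (ih _ _) (Nat.le_succ _)

-- proof-side segment-by-segment model with counters
def altOuter : List Char → Int
  | [] => 0
  | c :: rest => 1 + altOuter (altInner c (c :: rest) 0 0)
termination_by l => l.length
decreasing_by
  have h1 : altInner c (c :: rest) 0 0 = altInner c rest 1 0 := by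
    simp [altInner]
  rw [h1]
  exact Nat.lt_succ_of_le (altInner_length_le c rest 1 0)

theorem stepA_bal (cx ans : Int) (t i : Char) :
    stepA (cx, cx, ans, t) i = (cx + 1, cx, ans + 1, i) := by
  simp [stepA]

theorem stepA_unbal {cx cnx : Int} (h : cx ≠ cnx) (ans : Int) (t i : Char) :
    stepA (cx, cnx, ans, t) i =
      if t == i then (cx + 1, cnx, ans, t) else (cx, cnx + 1, ans, t) := by
  simp [stepA, h]

-- Mid-segment correspondence between A's cumulative counters and the per-segment scan.
theorem inner_corr (ref : Char) :
    ∀ (xs : List Char) (cx cnx ans same diff : Int),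
      cx - cnx = same - diff → same ≠ diff →
      ∃ cx' : Int,
        ((altInner ref xs same diff).foldl stepA (cx', cx', ans, ref)).2.2.1 =
          (xs.foldl stepA (cx, cnx, ans, ref)).2.2.1 := by
  intro xs
  induction xs with
  | nil =>
    intro cx cnx ans same diff h hne
    exact ⟨0, by simp [altInner]⟩
  | cons y ys ih =>
    intro cx cnx ans same diff h hne
    have hcx : cx ≠ cnx := by omega
    rw [List.foldl_cons, stepA_unbal hcx]
    by_cases hy : y = ref
    · subst hy
      rw [altInner_cons_same, if_pos (by simp : (y == y) = true)]
      by_cases hb : same + 1 = diff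
      · have hc : cx + 1 = cnx := by omega
        rw [if_pos (by simpa using hb), hc]
        exact ⟨cnx, rfl⟩
      · rw [if_neg (by simpa using hb)]
        exact ih (cx + 1) cnx ans (same + 1) diff (by omega) (by omega)
    · rw [if_neg (show ¬((ref == y) = true) by simpa using (Ne.symm hy)),
          altInner_cons_diff hy]
      by_cases hb : same = diff + 1
      · have hc : cx = cnx + 1 := by omega
        rw [if_pos (by simpa using hb)]
        exact ⟨cx, by rw [hc]⟩
      · rw [if_neg (by simpa using hb)]
        exact ih cx (cnx + 1) ans same (diff + 1) (by omega) (by omega)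

-- From any balanced state, A's fold adds exactly altOuter of the remaining characters.
theorem outer_corr :
    ∀ (xs : List Char) (cx ans : Int) (t : Char),
      (xs.foldl stepA (cx, cx, ans, t)).2.2.1 = ans + altOuter xs := by
  intro xs
  induction xs using altOuter.induct with
  | case1 => intro cx ans t; simp [altOuter]
  | case2 c rest ih =>
    intro cx ans t
    have hin : altInner c (c :: rest) 0 0 = altInner c rest 1 0 := by
      simp [altInner]
    obtain ⟨cx', hcorr⟩ := inner_corr c rest (cx + 1) cx (ans + 1) 1 0 (by omega) (by omega)
    have hih := ih cx' (ans + 1) c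
    rw [hin] at hih
    rw [altOuter, hin, List.foldl_cons, stepA_bal, ← hcorr, hih]
    ring

-- The counter scan from an odd position q stops exactly where B's even-length prefix
-- search starting at q+1 cuts.
-- Python's sum of booleans in Source B counts the characters equal to ref
theorem countP_beq_eq_count (l : List Char) (ref : Char) :
    l.countP (fun c => c == ref) = l.count ref := rfl

theorem count_take_succ (full : List Char) (ref : Char) (q : Nat) (hq : q < full.length) :
    (full.take (q + 1)).count ref =
      (full.take q).count ref + (if full[q] == ref then 1 else 0) := by
  rw [List.take_add_one, List.getElem?_eq_getElem hq, Option.toList_some, List.count_append]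
  simp [List.count_cons]

-- after a failed balance check at even position q+1, the scan consumes one more
-- character (no balance is possible at the odd position q+2) and the induction
-- hypothesis at q+2 applies.
theorem seg_step (full : List Char) (ref : Char) (n q : Nat)
    (hq1 : q < full.length) (hodd : q % 2 = 1)
    (hfuel : full.length - q ≤ n + 1)
    (ih : ∀ q', full.length - q' ≤ n → q' ≤ full.length → q' % 2 = 1 →
      altInner ref (full.drop q') ((full.take q').count ref : Int)
          ((q' : Int) - ((full.take q').count ref : Int)) =
        full.drop (searchCut full ref (q' + 1))) :
    altInner ref (full.drop (q + 1)) ((full.take (q + 1)).count ref : Int)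
        (((q : Int) + 1) - ((full.take (q + 1)).count ref : Int)) =
      full.drop (searchCut full ref (q + 1 + 2)) := by
  by_cases hlen : q + 1 = full.length
  · rw [searchCut, if_neg (by omega), hlen]
    simp [altInner]
  · have hq2 : q + 1 < full.length := by omega
    have hdrop2 : full.drop (q + 1) = full[q + 1] :: full.drop (q + 2) :=
      List.drop_eq_getElem_cons hq2
    have hpar : (q + 2) % 2 = 1 := by omega
    have hih := ih (q + 2) (by omega) (by omega) hpar
    rw [hdrop2]
    by_cases hy : full[q + 1] = ref
    · have hc2 : (full.take (q + 2)).count ref = (full.take (q + 1)).count ref + 1 := by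
        have h := count_take_succ full ref (q + 1) hq2
        rw [show q + 1 + 1 = q + 2 from by omega] at h
        simpa [hy] using h
      rw [hy, altInner_cons_same]
      rw [if_neg (show ¬((((full.take (q + 1)).count ref : Int) + 1 ==
            (q : Int) + 1 - ((full.take (q + 1)).count ref : Int)) = true) from by
          simp only [beq_iff_eq]; omega)]
      rw [show ((full.take (q + 1)).count ref : Int) + 1 =
            ((full.take (q + 2)).count ref : Int) from by omega]
      rw [show (q : Int) + 1 - ((full.take (q + 1)).count ref : Int) =
            ((q + 2 : Nat) : Int) - ((full.take (q + 2)).count ref : Int) from by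
          push_cast; omega]
      rw [show q + 1 + 2 = q + 2 + 1 from by omega]
      exact hih
    · have hc2 : (full.take (q + 2)).count ref = (full.take (q + 1)).count ref := by
        have h := count_take_succ full ref (q + 1) hq2
        rw [show q + 1 + 1 = q + 2 from by omega] at h
        simpa [hy] using h
      rw [altInner_cons_diff hy]
      rw [if_neg (show ¬((((full.take (q + 1)).count ref : Int) ==
            (q : Int) + 1 - ((full.take (q + 1)).count ref : Int) + 1) = true) from by
          simp only [beq_iff_eq]; omega)]
      rw [show ((full.take (q + 1)).count ref : Int) =
            ((full.take (q + 2)).count ref : Int) from by omega]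
      rw [show (q : Int) + 1 - ((full.take (q + 2)).count ref : Int) + 1 =
            ((q + 2 : Nat) : Int) - ((full.take (q + 2)).count ref : Int) from by
          push_cast; omega]
      rw [show q + 1 + 2 = q + 2 + 1 from by omega]
      exact hih

theorem seg_corr (full : List Char) (ref : Char) :
    ∀ (n q : Nat), full.length - q ≤ n → q ≤ full.length → q % 2 = 1 →
      altInner ref (full.drop q) ((full.take q).count ref : Int)
          ((q : Int) - ((full.take q).count ref : Int)) =
        full.drop (searchCut full ref (q + 1)) := by
  intro n
  induction n with
  | zero =>
    intro q hfuel hle _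
    have hq : q = full.length := by omega
    subst hq
    rw [searchCut, if_neg (by omega)]
    simp [altInner]
  | succ n ih =>
    intro q hfuel hle hodd
    by_cases hqlen : q = full.length
    · subst hqlen
      rw [searchCut, if_neg (by omega)]
      simp [altInner]
    · have hq1 : q < full.length := by omega
      have hdrop : full.drop q = full[q] :: full.drop (q + 1) :=
        List.drop_eq_getElem_cons hq1
      rw [searchCut, if_pos (show q + 1 ≤ full.length from by omega),
        countP_beq_eq_count, hdrop]
      by_cases hy : full[q] = ref
      · -- matching character at position q
        have hc1 : (full.take (q + 1)).count ref = (full.take q).count ref + 1 := by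
          simpa [hy] using count_take_succ full ref q hq1
        rw [hy, altInner_cons_same]
        by_cases hb : 2 * (full.take (q + 1)).count ref = q + 1
        · rw [if_pos hb]
          rw [if_pos (show ((((full.take q).count ref : Int)) + 1 ==
                (q : Int) - ((full.take q).count ref : Int)) = true from by
              simp only [beq_iff_eq]; omega)]
        · rw [if_neg hb]
          rw [if_neg (show ¬((((full.take q).count ref : Int) + 1 ==
                (q : Int) - ((full.take q).count ref : Int)) = true) from by
              simp only [beq_iff_eq]; omega)]
          rw [show ((full.take q).count ref : Int) + 1 =
                ((full.take (q + 1)).count ref : Int) from by omega]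
          rw [show (q : Int) - ((full.take q).count ref : Int) =
                (q : Int) + 1 - ((full.take (q + 1)).count ref : Int) from by omega]
          exact seg_step full ref n q hq1 hodd hfuel ih
      · -- mismatching character at position q
        have hc1 : (full.take (q + 1)).count ref = (full.take q).count ref := by
          simpa [hy] using count_take_succ full ref q hq1
        rw [altInner_cons_diff hy]
        by_cases hb : 2 * (full.take (q + 1)).count ref = q + 1
        · rw [if_pos hb]
          rw [if_pos (show (((full.take q).count ref : Int) ==
                (q : Int) - ((full.take q).count ref : Int) + 1) = true from by
              simp only [beq_iff_eq]; omega)]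
        · rw [if_neg hb]
          rw [if_neg (show ¬((((full.take q).count ref : Int) ==
                (q : Int) - ((full.take q).count ref : Int) + 1) = true) from by
              simp only [beq_iff_eq]; omega)]
          rw [show ((full.take q).count ref : Int) =
                ((full.take (q + 1)).count ref : Int) from by omega]
          rw [show (q : Int) - ((full.take (q + 1)).count ref : Int) + 1 =
                (q : Int) + 1 - ((full.take (q + 1)).count ref : Int) from by omega]
          exact seg_step full ref n q hq1 hodd hfuel ih

theorem altOuter_eq_altB : ∀ (xs : List Char), altOuter xs = altB xs := by
  intro xs
  induction xs using altB.induct with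
  | case1 => simp [altOuter, altB]
  | case2 c rs ih =>
    have hin : altInner c (c :: rs) 0 0 = altInner c rs 1 0 := by simp [altInner]
    have hseg := seg_corr (c :: rs) c (c :: rs).length 1 (by omega) (by simp) (by norm_num)
    simp only [List.take_one, List.head?_cons, Option.toList_some, List.count_singleton,
      List.drop_one, List.tail_cons] at hseg
    rw [altOuter, altB, hin]
    simp at hseg
    rw [hseg, ih]

-- ===== VERDICT (by name: the statement is the Claim_ definition above) =====
theorem solution_spec : Claim_equal_solution := by
  intro s _
  show solution s = solution_alt s
  have h := outer_corr s.toList 0 0 'A'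
  simp only [solution, solution_alt, ← altOuter_eq_altB]
  simpa using h
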